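-- pv_equiv track=rewrite | github.com/JohnSunny21/python-daily-coding | FreeCodeCamp/CodingQ/2026WinterGames/Day09Skeleton.py | get_difficulty_one
-- ===== SOURCE A (Python) =====
-- def get_difficulty_one(track):
--
--     difficulty = 0
--     i = 0
--
--     while i < len(track)-1:
--         if track[i] == "L" and track[i+1] == "R":
--             difficulty += 15
--         elif track[i] == "R" and track[i+1] == "L":
--             difficulty += 15
--         elif track[i] == "L" or track[i] == "R":
--             difficulty += 5
--         else:
--             difficulty += 0
--         i += 1
--
--
--     if 0 <= difficulty <= 100:
--         return "Easy"
--     elif 101 <= difficulty <= 200: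
--         return "Medium"
--     else:
--         return "Hard"
-- ===== SOURCE B (Python) =====
-- def get_difficulty_one(track):
--     transitions = sum(1 for a, b in zip(track, track[1:])
--                       if (a == "L" and b == "R") or (a == "R" and b == "L"))
--     steers = sum(1 for c in track[:-1] if c == "L" or c == "R")
--     difficulty = 10 * transitions + 5 * steers
--     if difficulty <= 100:
--         return "Easy"
--     elif difficulty <= 200:
--         return "Medium"
--     else:
--         return "Hard"
-- ===== Notes on version B (the rewrite author's own statement) =====
-- stated objective: simpler
-- what changed: Replaces the indexed while loop with two independent counts (transition pairs T and steering characters S over zipped/sliced views) recombined by the closed form difficulty = 10*T + 5*S, and drops the redundant 0<=d lower-bound checks.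
import Mathlib
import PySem

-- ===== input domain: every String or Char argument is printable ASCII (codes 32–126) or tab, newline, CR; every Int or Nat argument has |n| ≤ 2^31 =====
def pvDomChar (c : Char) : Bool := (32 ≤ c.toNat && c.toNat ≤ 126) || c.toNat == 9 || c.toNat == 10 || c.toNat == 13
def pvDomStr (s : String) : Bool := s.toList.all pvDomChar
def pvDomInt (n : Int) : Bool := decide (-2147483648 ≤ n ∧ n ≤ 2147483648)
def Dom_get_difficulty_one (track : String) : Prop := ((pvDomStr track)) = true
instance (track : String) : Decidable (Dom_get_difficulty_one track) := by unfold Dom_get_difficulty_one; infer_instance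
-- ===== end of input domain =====

-- B replaces A's indexed while loop by two independent counts (transition pairs and
-- steering characters) recombined by the closed form 10*T + 5*S; objective: simpler.


-- ===== PORT A =====
-- A's while loop: at each index i (i < len-1) look at track[i], track[i+1]; here the
-- sliding window is the recursion 'c1 :: c2 :: rest → c2 :: rest' over the same chars.
def pvALoop : List Char → Int → Int
  | c1 :: c2 :: rest, d =>
      pvALoop (c2 :: rest)
        (if c1 = 'L' ∧ c2 = 'R' then d + 15
         else if c1 = 'R' ∧ c2 = 'L' then d + 15
         else if c1 = 'L' ∨ c1 = 'R' then d + 5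
         else d + 0)
  | _, d => d

def get_difficulty_one (track : String) : String :=
  let difficulty := pvALoop track.toList 0
  if 0 ≤ difficulty ∧ difficulty ≤ 100 then "Easy"
  else if 101 ≤ difficulty ∧ difficulty ≤ 200 then "Medium"
  else "Hard"

-- ===== PORT B =====
def pvTransitions (cs : List Char) : Int :=
  ((cs.zip cs.tail).filter
    (fun p => (p.1 = 'L' && p.2 = 'R') || (p.1 = 'R' && p.2 = 'L'))).length

def pvSteers (cs : List Char) : Int :=
  (cs.dropLast.filter (fun c => c = 'L' || c = 'R')).length

def get_difficulty_one_alt (track : String) : String :=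
  let difficulty := 10 * pvTransitions track.toList + 5 * pvSteers track.toList
  if difficulty ≤ 100 then "Easy"
  else if difficulty ≤ 200 then "Medium"
  else "Hard"

-- ===== PRECONDITION & SPEC =====
def Spec_get_difficulty_one (track : String) (out : String) : Prop := out = get_difficulty_one_alt track
instance (track : String) (out : String) : Decidable (Spec_get_difficulty_one track out) := by unfold Spec_get_difficulty_one; infer_instance

-- ===== CLAIM (what is proved, stated in full; the proofs are below) =====
def Claim_equal_get_difficulty_one : Prop := ∀ (track : String), Dom_get_difficulty_one track → Spec_get_difficulty_one track (get_difficulty_one track)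

-- ===== LEMMAS AND PROOFS =====

theorem pvALoop_eq (cs : List Char) : ∀ d : Int,
    pvALoop cs d = d + 10 * pvTransitions cs + 5 * pvSteers cs := by
  induction cs with
  | nil => intro d; simp [pvALoop, pvTransitions, pvSteers]
  | cons c1 tail ih =>
      cases tail with
      | nil => intro d; simp [pvALoop, pvTransitions, pvSteers]
      | cons c2 rest =>
          intro d
          rw [pvALoop, ih]
          by_cases h1 : c1 = 'L' <;> by_cases h2 : c1 = 'R' <;>
            by_cases h3 : c2 = 'L' <;> by_cases h4 : c2 = 'R' <;>
            simp_all [pvTransitions, pvSteers] <;> ring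

theorem pvTransitions_nonneg (cs : List Char) : 0 ≤ pvTransitions cs := by
  simp [pvTransitions]

theorem pvSteers_nonneg (cs : List Char) : 0 ≤ pvSteers cs := by
  simp [pvSteers]

-- ===== VERDICT (by name: the statement is the Claim_ definition above) =====
theorem get_difficulty_one_spec : Claim_equal_get_difficulty_one := by
  intro track _
  unfold Spec_get_difficulty_one get_difficulty_one get_difficulty_one_alt
  rw [pvALoop_eq]
  have hT := pvTransitions_nonneg track.toList
  have hS := pvSteers_nonneg track.toList
  simp only []
  split_ifs with h1 h2 h3 h4 h5 <;> first | rfl | (exfalso; omega)
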